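-- pv_equiv track=rewrite | github.com/Mvgnu/BioLabs | backend/app/services/sequence_toolkit.py | _max_homodimer_run
-- ===== SOURCE A (Python) =====
-- def _normalize_sequence(seq: str) -> str:
--     """Return uppercase DNA sequence replacing U with T."""
--
--     # purpose: create canonical uppercase DNA sequences for downstream heuristics
--     normalized = (seq or "").upper().replace("U", "T")
--     return normalized
--
-- def _reverse_complement(seq: str) -> str:
--     """Return reverse complement of DNA sequence."""
--
--     table = str.maketrans("ACGTN", "TGCAN")
--     return _normalize_sequence(seq).translate(table)[::-1]
--
-- def _max_homodimer_run(seq: str) -> int: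
--     """Estimate longest homodimer complement run."""
--
--     # purpose: approximate homodimerization risk for primer validation
--     sequence = _normalize_sequence(seq)
--     rc = _reverse_complement(sequence)
--     max_run = 0
--     for offset in range(len(sequence)):
--         run = 0
--         for idx in range(len(sequence) - offset):
--             if sequence[offset + idx] == rc[idx]:
--                 run += 1
--                 if run > max_run:
--                     max_run = run
--             else:
--                 run = 0
--     return max_run
-- ===== SOURCE B (Python) =====
-- def _normalize_sequence(seq: str) -> str:
--     return (seq or "").upper().replace("U", "T")
--
--
-- def _reverse_complement(seq: str) -> str:
--     table = str.maketrans("ACGTN", "TGCAN")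
--     return _normalize_sequence(seq).translate(table)[::-1]
--
--
-- def _max_homodimer_run(seq: str) -> int:
--     # Row-major longest-common-substring DP between sequence and its reverse
--     # complement, keeping only the previous row of diagonal run lengths;
--     # cells with j <= i are the one-sided alignment register.
--     sequence = _normalize_sequence(seq)
--     rc = _reverse_complement(sequence)
--     n = len(sequence)
--     best = 0
--     prev = [0] * n
--     for i, ch in enumerate(sequence):
--         cur = [0] * n
--         for j, cj in enumerate(rc):
--             if ch == cj:
--                 cur[j] = (prev[j - 1] if j else 0) + 1
--                 if j <= i and cur[j] > best:
--                     best = cur[j]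
--         prev = cur
--     return best
-- ===== Notes on version B (the rewrite author's own statement) =====
-- stated objective: alternative
-- what changed: Replaces A's diagonal-by-diagonal scan with a single counter by a row-major longest-common-substring DP against the reverse complement that keeps one previous-row array of diagonal run lengths and registers maxima only on the one-sided cells j <= i.
import Mathlib
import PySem

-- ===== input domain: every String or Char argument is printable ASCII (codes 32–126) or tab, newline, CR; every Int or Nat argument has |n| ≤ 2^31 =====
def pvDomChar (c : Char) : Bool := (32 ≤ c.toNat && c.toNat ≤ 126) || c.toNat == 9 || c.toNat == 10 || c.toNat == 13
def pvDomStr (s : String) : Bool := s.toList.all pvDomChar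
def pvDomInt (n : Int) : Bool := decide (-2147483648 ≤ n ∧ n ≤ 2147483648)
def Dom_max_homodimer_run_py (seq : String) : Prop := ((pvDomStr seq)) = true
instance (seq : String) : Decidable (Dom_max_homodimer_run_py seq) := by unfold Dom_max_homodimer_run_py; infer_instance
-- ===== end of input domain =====

-- B replaces A's diagonal-by-diagonal scan with a row-major LCS-style DP that keeps one
-- previous-row array of diagonal run lengths (objective: alternative decomposition, same O(n^2) cost).

-- ===== PORT A =====
-- shared same-module helper _normalize_sequence: (seq or "").upper().replace("U", "T")
def pvNormalize (cs : List Char) : List Char :=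
  PySem.Chars.replace (PySem.Chars.upper cs) ['U'] ['T']

-- str.maketrans("ACGTN", "TGCAN") applied per character; characters outside the table
-- (including 'N' -> 'N') map to themselves — exact for .translate
def pvTransChar (c : Char) : Char :=
  if c = 'A' then 'T' else if c = 'C' then 'G' else if c = 'G' then 'C'
  else if c = 'T' then 'A' else c

-- shared helper _reverse_complement: normalize, translate, [::-1] (reversal, exact)
def pvRevComp (cs : List Char) : List Char :=
  ((pvNormalize cs).map pvTransChar).reverse

-- inner loop body of A: `if sequence[offset+idx] == rc[idx]: run += 1; max_run = max …`
-- (both indices are always in range in Python since len(rc) = len(sequence); the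
--  Option-level == on getElem? is exact there)
def pvInnerA (s rc : List Char) (offset : Nat) (st : Int × Int) (idx : Nat) : Int × Int :=
  if s[(offset + idx)]? == rc[idx]? then
    (st.1 + 1, if st.1 + 1 > st.2 then st.1 + 1 else st.2)
  else (0, st.2)

def max_homodimer_run_py (seq : String) : Int :=
  let sequence := pvNormalize seq.toList
  let rc := pvRevComp sequence
  (List.range sequence.length).foldl
    (fun max_run offset =>
      ((List.range (sequence.length - offset)).foldl (pvInnerA sequence rc offset) (0, max_run)).2)
    0

-- ===== PORT B =====
-- one row of B's DP: `for j, cj in enumerate(rc): …` building cur (accumulated reversed,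
-- then reversed back) and updating best on cells with j <= i; enumerate is rendered as
-- zipIdx (indices are the same nonnegative 0,1,2,…)
def pvRowStep (prev : List Int) (ch : Char) (i : Nat) (best0 : Int) (rc : List Char) :
    List Int × Int :=
  let st := rc.zipIdx.foldl
    (fun (st : List Int × Int) cj =>
      if ch = cj.1 then
        let v : Int := (if cj.2 = 0 then 0 else prev.getD (cj.2 - 1) 0) + 1
        (v :: st.1, if cj.2 ≤ i ∧ v > st.2 then v else st.2)
      else ((0 : Int) :: st.1, st.2))
    ([], best0)
  (st.1.reverse, st.2)

def max_homodimer_run_py_alt (seq : String) : Int :=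
  let sequence := pvNormalize seq.toList
  let rc := pvRevComp sequence
  (sequence.zipIdx.foldl
    (fun (st : List Int × Int) ci => pvRowStep st.1 ci.1 ci.2 st.2 rc)
    (List.replicate sequence.length 0, 0)).2

-- ===== PRECONDITION & SPEC =====
def Spec_max_homodimer_run_py (seq : String) (out : Int) : Prop := out = max_homodimer_run_py_alt seq
instance (seq : String) (out : Int) : Decidable (Spec_max_homodimer_run_py seq out) := by unfold Spec_max_homodimer_run_py; infer_instance

-- ===== CLAIM (what is proved, stated in full; the proofs are below) =====
def Claim_equal_max_homodimer_run_py : Prop := ∀ (seq : String), Dom_max_homodimer_run_py seq → Spec_max_homodimer_run_py seq (max_homodimer_run_py seq)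

-- ===== LEMMAS AND PROOFS =====

-- normalization as a per-character map
def pvNormChar (c : Char) : Char :=
  if PySem.Chars.upperChar c = 'U' then 'T' else PySem.Chars.upperChar c

theorem pv_replace_go_single (u t : Char) :
    ∀ (fuel : Nat) (l acc : List Char), l.length ≤ fuel →
      PySem.Chars.replace.go [u] [t] fuel l acc
        = acc.reverse ++ l.map (fun c => if c = u then t else c) := by
  intro fuel
  induction fuel with
  | zero =>
      intro l acc h
      have hl : l = [] := List.eq_nil_of_length_eq_zero (Nat.le_zero.1 h)
      subst hl; simp [PySem.Chars.replace.go]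
  | succ n ih =>
      intro l acc h
      cases l with
      | nil => simp [PySem.Chars.replace.go]
      | cons c cs =>
          by_cases hc : c = u
          · subst hc
            have : [c].isPrefixOf (c :: cs) = true := by simp [List.isPrefixOf]
            simp only [PySem.Chars.replace.go, this, if_pos]
            simp only [List.length_cons, List.length_nil, List.drop_succ_cons, List.drop_zero,
              List.reverse_cons, List.reverse_nil, List.nil_append, List.singleton_append]
            rw [ih cs (t :: acc) (by simpa using Nat.lt_succ_iff.mp (by simpa using h))]
            simp
          · have : [u].isPrefixOf (c :: cs) = false := by
              simp [List.isPrefixOf]; intro h'; exact absurd h'.symm hc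
            simp only [PySem.Chars.replace.go, this, Bool.false_eq_true, if_false]
            rw [ih cs (c :: acc) (by simpa using Nat.lt_succ_iff.mp (by simpa using h))]
            simp [hc]

theorem pvNormalize_eq_map (cs : List Char) : pvNormalize cs = cs.map pvNormChar := by
  unfold pvNormalize
  rw [PySem.Chars.replace]
  simp only [List.isEmpty_cons]
  rw [pv_replace_go_single 'U' 'T' _ _ _ (le_refl _)]
  simp [PySem.Chars.upper, List.map_map, pvNormChar, Function.comp]

theorem pvNormalize_length (cs : List Char) : (pvNormalize cs).length = cs.length := by
  rw [pvNormalize_eq_map]; simp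

theorem pvRevComp_length (cs : List Char) : (pvRevComp cs).length = cs.length := by
  unfold pvRevComp; simp [pvNormalize_length]

-- run length of the complement-match diagonal ending at cell (i, j)
def pvDp (s r : List Char) : Nat → Nat → Int
  | i, 0 => if s[i]? == r[0]? then 1 else 0
  | 0, j + 1 => if s[0]? == r[(j + 1)]? then 1 else 0
  | i + 1, j + 1 => if s[(i + 1)]? == r[(j + 1)]? then pvDp s r i j + 1 else 0

theorem pvDp_false {s r : List Char} {i j : Nat}
    (h : ¬ (s[i]? == r[j]?) = true) : pvDp s r i j = 0 := by
  match i, j with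
  | i, 0 => simp only [pvDp]; exact if_neg h
  | 0, j + 1 => simp only [pvDp]; exact if_neg h
  | i + 1, j + 1 => simp only [pvDp]; exact if_neg h

theorem pvDp_succ_succ (s r : List Char) (i j : Nat) :
    pvDp s r (i + 1) (j + 1)
      = if s[(i + 1)]? == r[(j + 1)]? then pvDp s r i j + 1 else 0 := by
  simp only [pvDp]

theorem pvDp_zero_right (s r : List Char) (i : Nat) :
    pvDp s r i 0 = if s[i]? == r[0]? then 1 else 0 := by
  simp only [pvDp]

theorem pvDp_zero_left (s r : List Char) (j : Nat) :
    pvDp s r 0 j = if s[0]? == r[j]? then 1 else 0 := by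
  cases j
  · simp only [pvDp]
  · simp only [pvDp]

-- generic facts about foldl-with-max
theorem pv_le_foldl_max {α : Type} (f : α → Int) :
    ∀ (l : List α) (b : Int), b ≤ l.foldl (fun a x => max a (f x)) b := by
  intro l
  induction l with
  | nil => intro b; simp
  | cons x l ih => intro b; exact le_trans (le_max_left b (f x)) (ih (max b (f x)))

theorem pv_mem_le_foldl_max {α : Type} (f : α → Int) :
    ∀ (l : List α) (b : Int) (x : α), x ∈ l → f x ≤ l.foldl (fun a x => max a (f x)) b := by
  intro l
  induction l with
  | nil => intro b x hx; simp at hx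
  | cons y l ih =>
      intro b x hx
      rcases List.mem_cons.1 hx with h | h
      · subst h; exact le_trans (le_max_right b (f x)) (pv_le_foldl_max f l _)
      · exact ih _ x h

theorem pv_foldl_max_le {α : Type} (f : α → Int) :
    ∀ (l : List α) (b c : Int), (∀ x ∈ l, f x ≤ c) → b ≤ c →
      l.foldl (fun a x => max a (f x)) b ≤ c := by
  intro l
  induction l with
  | nil => intro b c _ hb; simpa using hb
  | cons x l ih =>
      intro b c h hb
      exact ih _ c (fun y hy => h y (List.mem_cons_of_mem _ hy))
        (max_le hb (h x List.mem_cons_self))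

theorem pv_le_foldl_of_step {α : Type} (f : Int → α → Int) (hf : ∀ (a : Int) (x : α), a ≤ f a x) :
    ∀ (l : List α) (b : Int), b ≤ l.foldl f b := by
  intro l
  induction l with
  | nil => intro b; simp
  | cons x l ih => intro b; exact le_trans (hf b x) (ih (f b x))

theorem pv_foldl_max_eq_of_mem_iff {α β : Type} (f : α → Int) (g : β → Int)
    (l : List α) (l' : List β)
    (h : ∀ i : Int, (∃ x ∈ l, f x = i) ↔ (∃ y ∈ l', g y = i)) :
    l.foldl (fun a x => max a (f x)) 0 = l'.foldl (fun a y => max a (g y)) 0 := by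
  apply le_antisymm
  · refine pv_foldl_max_le f l 0 _ ?_ (pv_le_foldl_max g l' 0)
    intro x hx
    obtain ⟨y, hy, hgy⟩ := (h (f x)).1 ⟨x, hx, rfl⟩
    exact hgy ▸ pv_mem_le_foldl_max g l' 0 y hy
  · refine pv_foldl_max_le g l' 0 _ ?_ (pv_le_foldl_max f l 0)
    intro y hy
    obtain ⟨x, hx, hfx⟩ := (h (g y)).2 ⟨y, hy, rfl⟩
    exact hfx ▸ pv_mem_le_foldl_max f l 0 x hx

theorem pv_if_gt_eq_max (a b : Int) : (if a > b then a else b) = max b a := by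
  rw [max_def]; split_ifs <;> omega

theorem pv_foldl_congr_nonneg (f g : Int → Nat → Int)
    (hfg : ∀ (b : Int) (o : Nat), 0 ≤ b → f b o = g b o)
    (hg : ∀ (b : Int) (o : Nat), 0 ≤ b → b ≤ g b o) :
    ∀ (l : List Nat) (b : Int), 0 ≤ b → l.foldl f b = l.foldl g b := by
  intro l
  induction l with
  | nil => intro b _; rfl
  | cons x l ih =>
      intro b hb
      rw [List.foldl_cons, List.foldl_cons, hfg b x hb]
      exact ih _ (le_trans hb (hg b x hb))

-- ===== A side =====

theorem pv_innerA_spec (s r : List Char) (o : Nat) :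
    ∀ (m : Nat) (b : Int), 0 ≤ b →
      (List.range m).foldl (pvInnerA s r o) (0, b)
        = ((if m = 0 then 0 else pvDp s r (o + (m - 1)) (m - 1)),
           (List.range m).foldl (fun a k => max a (pvDp s r (o + k) k)) b) := by
  intro m
  induction m with
  | zero => intro b hb; simp
  | succ m ih =>
      intro b hb
      rw [List.range_succ, List.foldl_append, List.foldl_append, ih b hb]
      simp only [List.foldl_cons, List.foldl_nil]
      have hbm : 0 ≤ (List.range m).foldl (fun a k => max a (pvDp s r (o + k) k)) b :=
        le_trans hb (pv_le_foldl_max _ _ _)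
      unfold pvInnerA
      by_cases h : (s[(o + m)]? == r[m]?) = true
      · rw [if_pos h]
        have hrun : (if m = 0 then 0 else pvDp s r (o + (m - 1)) (m - 1)) + 1
            = pvDp s r (o + m) m := by
          cases m with
          | zero =>
              rw [pvDp_zero_right]
              rw [show o + 0 = o from rfl] at h
              simp [h]
          | succ k =>
              have e : o + (k + 1) = (o + k) + 1 := by omega
              rw [e] at h ⊢
              rw [pvDp_succ_succ s r (o + k) k, if_pos h]
              simp
        simp [hrun, pv_if_gt_eq_max]
      · rw [if_neg h]
        have hdp : pvDp s r (o + m) m = 0 := pvDp_false h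
        simp [hdp, max_eq_left hbm]

theorem pv_portA_pairs (s r : List Char) :
    (List.range s.length).foldl
      (fun max_run offset =>
        ((List.range (s.length - offset)).foldl (pvInnerA s r offset) (0, max_run)).2) 0
    = ((List.range s.length).flatMap
        (fun o => (List.range (s.length - o)).map (fun k => (o + k, k)))).foldl
        (fun a p => max a (pvDp s r p.1 p.2)) 0 := by
  rw [List.foldl_flatMap]
  simp only [List.foldl_map]
  exact pv_foldl_congr_nonneg _ _
    (fun b o hb => by rw [pv_innerA_spec s r o _ b hb])
    (fun b o hb => pv_le_foldl_max _ _ _)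
    (List.range s.length) 0 le_rfl

-- ===== B side =====

-- value of a DP cell computed by one row step, from the characters handed over by zipIdx
def pvCellVal (prev : List Int) (ch : Char) (c : Char) (j : Nat) : Int :=
  if ch = c then (if j = 0 then 0 else prev.getD (j - 1) 0) + 1 else 0

theorem pv_rowfold_aux (prev : List Int) (ch : Char) (i : Nat) :
    ∀ (t : List Char) (k : Nat) (accL : List Int) (b : Int),
      (t.zipIdx k).foldl
        (fun (st : List Int × Int) cj =>
          if ch = cj.1 then
            let v : Int := (if cj.2 = 0 then 0 else prev.getD (cj.2 - 1) 0) + 1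
            (v :: st.1, if cj.2 ≤ i ∧ v > st.2 then v else st.2)
          else ((0 : Int) :: st.1, st.2))
        (accL, b)
      = (((t.zipIdx k).map (fun cj => pvCellVal prev ch cj.1 cj.2)).reverse ++ accL,
         (t.zipIdx k).foldl
           (fun a cj =>
             if ch = cj.1 then
               (if cj.2 ≤ i ∧ ((if cj.2 = 0 then 0 else prev.getD (cj.2 - 1) 0) + 1) > a
                then (if cj.2 = 0 then 0 else prev.getD (cj.2 - 1) 0) + 1 else a)
             else a) b) := by
  intro t
  induction t with
  | nil => intro k accL b; simp
  | cons c t ih =>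
      intro k accL b
      simp only [List.zipIdx_cons, List.foldl_cons, List.map_cons, List.reverse_cons]
      by_cases hc : ch = c
      · simp only [if_pos hc]
        rw [ih]
        simp [pvCellVal, hc]
      · simp only [if_neg hc]
        rw [ih]
        simp [pvCellVal, hc]

theorem pv_rowfold_aux2 (prev : List Int) (ch : Char) (i : Nat) :
    ∀ (t : List Char) (k : Nat) (b : Int), 0 ≤ b →
      (t.zipIdx k).foldl
        (fun a cj =>
          if ch = cj.1 then
            (if cj.2 ≤ i ∧ ((if cj.2 = 0 then 0 else prev.getD (cj.2 - 1) 0) + 1) > a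
             then (if cj.2 = 0 then 0 else prev.getD (cj.2 - 1) 0) + 1 else a)
          else a) b
      = (t.zipIdx k).foldl
          (fun a cj => if cj.2 ≤ i then max a (pvCellVal prev ch cj.1 cj.2) else a) b := by
  intro t
  induction t with
  | nil => intro k b _; rfl
  | cons c t ih =>
      intro k b hb
      simp only [List.zipIdx_cons, List.foldl_cons]
      by_cases hc : ch = c
      · by_cases hk : k ≤ i
        · have hstep :
              (if ch = c then
                (if k ≤ i ∧ ((if k = 0 then 0 else prev.getD (k - 1) 0) + 1) > b
                 then (if k = 0 then 0 else prev.getD (k - 1) 0) + 1 else b)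
               else b)
              = (if k ≤ i then max b (pvCellVal prev ch c k) else b) := by
            simp only [if_pos hc, hk, true_and, pvCellVal]
            exact pv_if_gt_eq_max _ _
          rw [hstep]
          exact ih _ _ (le_trans hb (by simp [hk]))
        · have hstep :
              (if ch = c then
                (if k ≤ i ∧ ((if k = 0 then 0 else prev.getD (k - 1) 0) + 1) > b
                 then (if k = 0 then 0 else prev.getD (k - 1) 0) + 1 else b)
               else b)
              = (if k ≤ i then max b (pvCellVal prev ch c k) else b) := by
            simp [hc, hk]
          rw [hstep]
          simp only [if_neg hk]
          exact ih _ _ hb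
      · have hstep :
            (if ch = c then
              (if k ≤ i ∧ ((if k = 0 then 0 else prev.getD (k - 1) 0) + 1) > b
               then (if k = 0 then 0 else prev.getD (k - 1) 0) + 1 else b)
             else b)
            = (if k ≤ i then max b (pvCellVal prev ch c k) else b) := by
          simp [hc, pvCellVal, max_eq_left hb]
        rw [hstep]
        by_cases hk : k ≤ i
        · simp only [if_pos hk, pvCellVal, if_neg hc, max_eq_left hb]
          exact ih _ _ hb
        · simp only [if_neg hk]
          exact ih _ _ hb

theorem pv_rowStep_spec (prev : List Int) (ch : Char) (i : Nat) (r : List Char) :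
    ∀ (b : Int), 0 ≤ b →
      pvRowStep prev ch i b r
        = (r.zipIdx.map (fun cj => pvCellVal prev ch cj.1 cj.2),
           r.zipIdx.foldl
             (fun a cj => if cj.2 ≤ i then max a (pvCellVal prev ch cj.1 cj.2) else a) b) := by
  intro b hb
  unfold pvRowStep
  rw [pv_rowfold_aux prev ch i r 0 [] b]
  rw [Prod.mk.injEq]
  constructor
  · simp
  · exact pv_rowfold_aux2 prev ch i r 0 b hb

-- zipIdx folds/maps as range folds/maps
theorem pv_foldl_zipIdx {α β : Type} (h : β → α → Nat → β) (d : α) :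
    ∀ (t : List α) (k : Nat) (b : β),
      (t.zipIdx k).foldl (fun a cj => h a cj.1 cj.2) b
        = (List.range t.length).foldl (fun a u => h a (t.getD u d) (k + u)) b := by
  intro t
  induction t with
  | nil => intro k b; rfl
  | cons c t ih =>
      intro k b
      rw [List.zipIdx_cons, List.foldl_cons, List.length_cons, List.range_succ_eq_map,
        List.foldl_cons, List.foldl_map, ih (k + 1)]
      have : (fun (a : β) (u : Nat) => h a (t.getD u d) (k + 1 + u))
          = (fun (a : β) (u : Nat) => h a ((c :: t).getD u.succ d) (k + u.succ)) := by
        funext a u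
        rw [List.getD_cons_succ]
        have : k + 1 + u = k + u.succ := by omega
        rw [this]
      rw [this]
      rfl

theorem pv_map_zipIdx {α β : Type} (g : α → Nat → β) (d : α) :
    ∀ (t : List α) (k : Nat),
      (t.zipIdx k).map (fun cj => g cj.1 cj.2)
        = (List.range t.length).map (fun u => g (t.getD u d) (k + u)) := by
  intro t
  induction t with
  | nil => intro k; rfl
  | cons c t ih =>
      intro k
      rw [List.zipIdx_cons, List.map_cons, List.length_cons, List.range_succ_eq_map,
        List.map_cons, List.map_map, ih (k + 1)]
      have : ((fun u => g (t.getD u d) (k + 1 + u)))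
          = (fun (u : Nat) => g ((c :: t).getD u.succ d) (k + u.succ)) := by
        funext u
        rw [List.getD_cons_succ]
        have : k + 1 + u = k + u.succ := by omega
        rw [this]
      rw [this]
      rfl

-- previous-row array before processing row i
def pvPrevRow (s r : List Char) : Nat → List Int
  | 0 => List.replicate s.length 0
  | i + 1 => (List.range r.length).map (fun j => pvDp s r i j)

-- best value accumulated by B after the first m rows
def pvBestB (s r : List Char) (m : Nat) : Int :=
  (List.range m).foldl
    (fun b i =>
      (List.range r.length).foldl
        (fun a j => if j ≤ i then max a (pvDp s r i j) else a) b) 0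

theorem pv_cell_eq_dp (s r : List Char) (i j : Nat) (hi : i < s.length) (hj : j < r.length) :
    pvCellVal (pvPrevRow s r i) (s.getD i 'A') (r.getD j 'A') j = pvDp s r i j := by
  have hs : s[i]? = some s[i] := List.getElem?_eq_getElem hi
  have hr : r[j]? = some r[j] := List.getElem?_eq_getElem hj
  have hsD : s.getD i 'A' = s[i] := by rw [List.getD_eq_getElem?_getD, hs]; rfl
  have hrD : r.getD j 'A' = r[j] := by rw [List.getD_eq_getElem?_getD, hr]; rfl
  have hchar : ((s[i]? == r[j]?) = true) ↔ (s.getD i 'A' = r.getD j 'A') := by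
    rw [hs, hr, hsD, hrD]; simp
  by_cases hc : s.getD i 'A' = r.getD j 'A'
  · have hcond : (s[i]? == r[j]?) = true := hchar.mpr hc
    cases j with
    | zero =>
        rw [pvDp_zero_right, if_pos hcond]
        simp only [pvCellVal, if_pos hc]
        norm_num
    | succ m =>
        cases i with
        | zero =>
            rw [pvDp_zero_left, if_pos hcond]
            have hrep : (List.replicate s.length (0 : Int)).getD m 0 = 0 := by
              rcases Nat.lt_or_ge m s.length with h | h
              · exact List.getD_replicate _ h
              · exact List.getD_eq_default _ _ (by simpa using h)
            simp only [pvCellVal, if_pos hc, pvPrevRow, Nat.succ_ne_zero, if_false,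
              Nat.add_sub_cancel, hrep]
            norm_num
        | succ n =>
            rw [pvDp_succ_succ, if_pos hcond]
            have hm : m < r.length := by omega
            have hprev : ((List.range r.length).map (fun j => pvDp s r n j)).getD m 0
                = pvDp s r n m := by
              rw [List.getD_eq_getElem _ _ (by simpa using hm)]
              simp
            simp only [pvCellVal, if_pos hc, pvPrevRow, Nat.succ_ne_zero, if_false,
              Nat.add_sub_cancel, hprev]
  · have hcond : ¬ ((s[i]? == r[j]?) = true) := fun h => hc (hchar.mp h)
    rw [pvDp_false hcond]
    simp only [pvCellVal, if_neg hc]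

theorem pvBestB_nonneg (s r : List Char) (m : Nat) : 0 ≤ pvBestB s r m :=
  pv_le_foldl_of_step _
    (fun b i => pv_le_foldl_of_step _
      (fun a j => by split
                     · exact le_max_left _ _
                     · exact le_rfl) _ b) _ 0

theorem pv_portB_rows (s r : List Char) :
    ∀ (m : Nat), m ≤ s.length →
      ((List.range m).foldl
          (fun (st : List Int × Int) i => pvRowStep st.1 (s.getD i 'A') i st.2 r)
          (List.replicate s.length 0, 0))
        = (pvPrevRow s r m, pvBestB s r m) := by
  intro m
  induction m with
  | zero => intro _; simp [pvPrevRow, pvBestB]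
  | succ m ih =>
      intro h
      rw [List.range_succ, List.foldl_append, ih (by omega)]
      simp only [List.foldl_cons, List.foldl_nil]
      rw [pv_rowStep_spec _ _ _ _ _ (pvBestB_nonneg s r m)]
      rw [Prod.mk.injEq]
      constructor
      · rw [pv_map_zipIdx (fun c j => pvCellVal (pvPrevRow s r m) (s.getD m 'A') c j) 'A' r 0]
        apply List.map_congr_left
        intro j hj
        rw [Nat.zero_add]
        exact pv_cell_eq_dp s r m j (by omega) (List.mem_range.mp hj)
      · rw [pv_foldl_zipIdx
            (fun a c j => if j ≤ m then max a (pvCellVal (pvPrevRow s r m) (s.getD m 'A') c j) else a)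
            'A' r 0]
        unfold pvBestB
        rw [List.range_succ, List.foldl_append]
        simp only [List.foldl_cons, List.foldl_nil]
        apply PySem.List.foldl_congr_mem
        intro acc j hj
        rw [Nat.zero_add]
        by_cases hjm : j ≤ m
        · rw [if_pos hjm, if_pos hjm,
            pv_cell_eq_dp s r m j (by omega) (List.mem_range.mp hj)]
        · rw [if_neg hjm, if_neg hjm]

theorem pv_foldl_guard_filter {α : Type} (p : α → Prop) [DecidablePred p] (f : Int → α → Int) :
    ∀ (l : List α) (b : Int),
      l.foldl (fun a x => if p x then f a x else a) b
        = (l.filter (fun x => decide (p x))).foldl f b := by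
  intro l
  induction l with
  | nil => intro b; rfl
  | cons x l ih =>
      intro b
      by_cases hx : p x
      · simp only [List.foldl_cons, if_pos hx, List.filter_cons, decide_eq_true hx,
          if_true]
        rw [ih]
      · simp only [List.foldl_cons, if_neg hx, List.filter_cons]
        rw [decide_eq_false hx]
        simp only [Bool.false_eq_true, if_false]
        rw [ih]

theorem pv_bestB_pairs (s r : List Char) (m : Nat) :
    pvBestB s r m
      = ((List.range m).flatMap
          (fun i => ((List.range r.length).filter (fun j => j ≤ i)).map (fun j => (i, j)))).foldl
          (fun a p => max a (pvDp s r p.1 p.2)) 0 := by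
  rw [List.foldl_flatMap]
  simp only [List.foldl_map]
  unfold pvBestB
  apply PySem.List.foldl_congr_mem
  intro acc i _
  exact pv_foldl_guard_filter (fun j => j ≤ i) (fun a j => max a (pvDp s r i j)) _ acc

-- membership of the two pair lists coincides when |r| = |s|
theorem pv_pairs_mem (s r : List Char) (hr : r.length = s.length) (p : Nat × Nat) :
    (p ∈ (List.range s.length).flatMap
        (fun o => (List.range (s.length - o)).map (fun k => (o + k, k))))
      ↔ (p ∈ (List.range s.length).flatMap
          (fun i => ((List.range r.length).filter (fun j => j ≤ i)).map (fun j => (i, j)))) := by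
  cases p with
  | mk a b =>
      simp only [List.mem_flatMap, List.mem_map, List.mem_range, List.mem_filter,
        Prod.mk.injEq, decide_eq_true_eq]
      constructor
      · rintro ⟨o, ho, k, hk, h1, h2⟩
        exact ⟨a, by omega, b, ⟨by omega, by omega⟩, rfl, rfl⟩
      · rintro ⟨i, hi, j, ⟨hj, hji⟩, h1, h2⟩
        exact ⟨a - b, by omega, b, by omega, by omega, rfl⟩

theorem pv_main (s r : List Char) (hr : r.length = s.length) :
    (List.range s.length).foldl
      (fun max_run offset =>
        ((List.range (s.length - offset)).foldl (pvInnerA s r offset) (0, max_run)).2) 0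
    = ((s.zipIdx).foldl
        (fun (st : List Int × Int) ci => pvRowStep st.1 ci.1 ci.2 st.2 r)
        (List.replicate s.length 0, 0)).2 := by
  rw [pv_portA_pairs s r]
  rw [pv_foldl_zipIdx (fun (st : List Int × Int) c i => pvRowStep st.1 c i st.2 r) 'A' s 0]
  simp only [Nat.zero_add]
  rw [pv_portB_rows s r s.length le_rfl]
  rw [pv_bestB_pairs s r s.length]
  exact pv_foldl_max_eq_of_mem_iff _ _ _ _
    (fun v =>
      ⟨fun ⟨x, hx, hfx⟩ => ⟨x, (pv_pairs_mem s r hr x).1 hx, hfx⟩,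
       fun ⟨y, hy, hfy⟩ => ⟨y, (pv_pairs_mem s r hr y).2 hy, hfy⟩⟩)

-- ===== VERDICT (by name: the statement is the Claim_ definition above) =====
theorem max_homodimer_run_py_spec : Claim_equal_max_homodimer_run_py := by
  intro seq _
  unfold Spec_max_homodimer_run_py max_homodimer_run_py max_homodimer_run_py_alt
  exact pv_main (pvNormalize seq.toList) (pvRevComp (pvNormalize seq.toList))
    (pvRevComp_length _)
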